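-- pv_equiv track=rewrite | github.com/aman-bcalm/Scaler-Problems | Day 3/SmallestXor.py | solve
-- ===== SOURCE A (Python) =====
-- def solve(A, B):
--     a_pos1 = []
--     pos = 0
--     a_pos0 = []
--
--     while(A !=0 ):
--         if A & 1 == 1:
--             a_pos1.append(pos)
--         else :
--             a_pos0.append(pos)
--         pos +=1
--         A = A >> 1
--
--
--     a_pos0.reverse()
--
--     X = 0
--     while B != 0 :
--         if len(a_pos1) !=0 :
--              pos_toset = a_pos1.pop()
--              X = X | 1 << pos_toset
--         elif len (a_pos0) !=0 :
--              pos_toset = a_pos0.pop()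
--              X = X | 1 << pos_toset
--         else :
--              no_bits = 0
--              temp = X
--              while temp !=0 :
--                 temp = temp >> 1
--                 no_bits += 1
--              X = X | 1 << no_bits
--
--         B -=1
--
--     return X
-- ===== SOURCE B (Python) =====
-- def solve(A, B):
--     # greedy closed form: take the top B set bits of A; if B exceeds the
--     # popcount, the answer is A with its lowest zero bits filled in, and once
--     # every position below bit_length is used the result saturates to 2**B - 1.
--     bl = A.bit_length()
--     set_bits = [i for i in range(bl) if (A >> i) & 1]
--     n = len(set_bits)
--     if B <= n:
--         return sum(1 << p for p in set_bits[n - B:])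
--     if B >= bl:
--         return (1 << B) - 1
--     zeros = [i for i in range(bl) if not (A >> i) & 1]
--     return A + sum(1 << z for z in zeros[:B - n])
-- ===== Notes on version B (the rewrite author's own statement) =====
-- stated objective: faster
-- what changed: A runs a three-phase popping loop B times (pop highest set bit, pop lowest clear bit, else recount X's bit length each iteration); B replaces it by a case split with closed forms: a slice-sum of the top B set-bit positions when B <= popcount(A), the literal (1 << B) - 1 when B >= A.bit_length(), and A plus the sum over the lowest B - popcount zero positions otherwise — O(bit_length(A)) instead of O(B * bit_length(A)).
import Mathlib
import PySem

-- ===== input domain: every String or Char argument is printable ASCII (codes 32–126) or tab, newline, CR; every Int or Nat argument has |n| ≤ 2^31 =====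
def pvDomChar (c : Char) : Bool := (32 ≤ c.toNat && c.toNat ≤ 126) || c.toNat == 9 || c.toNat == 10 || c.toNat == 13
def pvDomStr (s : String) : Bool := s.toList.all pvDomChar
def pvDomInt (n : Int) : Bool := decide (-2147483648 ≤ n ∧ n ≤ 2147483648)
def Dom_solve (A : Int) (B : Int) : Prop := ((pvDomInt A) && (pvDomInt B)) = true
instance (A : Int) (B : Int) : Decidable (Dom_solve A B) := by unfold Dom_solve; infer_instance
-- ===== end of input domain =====

-- B re-implements the same greedy by a case split and closed forms (slice of the set-bit
-- positions / saturation to 2^B - 1) instead of A's B-iteration popping loop (measured faster in a timing run).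

-- ===== PORT A =====
-- first while-loop of A: classify bit positions of A into set (p1) and clear (p0) positions,
-- low to high.  Positions are naturals by construction; the Nat argument `a` is A.toNat —
-- Python loops forever on negative A, which Pre_solve excludes.
def solveBits (a : Nat) (pos : Nat) (p1 p0 : List Nat) : List Nat × List Nat :=
  if hnz : a ≠ 0 then
    if a % 2 = 1 then
      solveBits (a / 2) (pos + 1) (p1 ++ [pos]) p0   -- a_pos1.append(pos)
    else
      solveBits (a / 2) (pos + 1) p1 (p0 ++ [pos])   -- a_pos0.append(pos)
  else (p1, p0)
termination_by a
decreasing_by all_goals exact Nat.div_lt_self (Nat.pos_of_ne_zero hnz) one_lt_two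

-- innermost while-loop of A: count the bits of temp (temp is the nonnegative X)
def solveNoBits (temp : Nat) (acc : Nat) : Nat :=
  if temp ≠ 0 then solveNoBits (temp / 2) (acc + 1) else acc
termination_by temp
decreasing_by exact Nat.div_lt_self (Nat.pos_of_ne_zero (by omega)) one_lt_two

-- second while-loop of A: pop from a_pos1, then a_pos0, else set the bit at X's bit length.
-- Guard `0 < B`: Python's `B != 0` loops forever for negative B, which Pre_solve excludes.
def solvePop (B : Int) (X : Nat) (p1 p0 : List Nat) : Nat :=
  if h : 0 < B then
    if h1 : p1 ≠ [] then
      solvePop (B - 1) (X ||| 2 ^ (p1.getLast h1)) p1.dropLast p0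
    else if h0 : p0 ≠ [] then
      solvePop (B - 1) (X ||| 2 ^ (p0.getLast h0)) p1 p0.dropLast
    else
      solvePop (B - 1) (X ||| 2 ^ (solveNoBits X 0)) p1 p0
  else X
termination_by B.toNat
decreasing_by all_goals omega

def solve (A : Int) (B : Int) : Int :=
  let bs := solveBits A.toNat 0 [] []
  -- a_pos0.reverse(); X = 0; then the popping loop
  ((solvePop B 0 bs.1 bs.2.reverse : Nat) : Int)

-- ===== PORT B =====
def solve_alt (A : Int) (B : Int) : Int :=
  let bl : Nat := PySem.Int.bitLength A
  let setBits : List Nat := (List.range bl).filter (fun i => PySem.Int.band (A >>> i) 1 == 1)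
  let n : Nat := setBits.length
  if B ≤ (n : Int) then
    -- sum(1 << p for p in set_bits[n - B:])
    (((setBits.drop ((n : Int) - B).toNat).foldl (fun s p => s + 2 ^ p) (0 : Nat)) : Int)
  else if B ≥ (bl : Int) then
    (1 : Int) <<< B.toNat - 1          -- (1 << B) - 1
  else
    let zeros : List Nat := (List.range bl).filter (fun i => ¬ (PySem.Int.band (A >>> i) 1 == 1))
    A + (((zeros.take (B.toNat - n)).foldl (fun s z => s + 2 ^ z) (0 : Nat)) : Int)

-- ===== PRECONDITION & SPEC =====
-- Pre_solve: Python A's two while-loops never terminate for A < 0 or B < 0 (A >> 1 stays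
-- negative; B -= 1 never reaches 0), so only nonnegative inputs are claimed.
def Pre_solve (A : Int) (B : Int) : Prop := 0 ≤ A ∧ 0 ≤ B
instance (A : Int) (B : Int) : Decidable (Pre_solve A B) := by unfold Pre_solve; infer_instance
def pvWitness_solve : Int × Int := (5, 2)
def Spec_solve (A : Int) (B : Int) (out : Int) : Prop := out = solve_alt A B
instance (A : Int) (B : Int) (out : Int) : Decidable (Spec_solve A B out) := by unfold Spec_solve; infer_instance

-- ===== CLAIM (what is proved, stated in full; the proofs are below) =====
def Claim_equal_solve : Prop := ∀ (A : Int) (B : Int), Dom_solve A B → Pre_solve A B → Spec_solve A B (solve A B)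

-- ===== LEMMAS AND PROOFS =====

-- spec-side descriptions of the two position lists
def onesF (a : Nat) : List Nat :=
  if h : a = 0 then [] else
    (if a % 2 = 1 then [0] else []) ++ (onesF (a / 2)).map (· + 1)
termination_by a
decreasing_by exact Nat.div_lt_self (Nat.pos_of_ne_zero h) one_lt_two

def zerosF (a : Nat) : List Nat :=
  if h : a = 0 then [] else
    (if a % 2 = 1 then [] else [0]) ++ (zerosF (a / 2)).map (· + 1)
termination_by a
decreasing_by exact Nat.div_lt_self (Nat.pos_of_ne_zero h) one_lt_two

def sumP (l : List Nat) : Nat := (l.map (2 ^ ·)).sum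

lemma onesF_filter (a : Nat) :
    onesF a = (List.range (PySem.Int.bitLength (a : Int))).filter
      (fun i => a / 2 ^ i % 2 == 1) := by
  induction a using Nat.strong_induction_on with
  | _ a ih =>
    by_cases h0 : a = 0
    · subst h0; simp [onesF, PySem.Int.bitLength_zero]
    · rw [onesF]; simp only [h0, dite_false]
      rw [PySem.Int.bitLength_natCast (Nat.pos_of_ne_zero h0), List.range_succ_eq_map,
        List.filter_cons, List.filter_map,
        ih (a / 2) (Nat.div_lt_self (Nat.pos_of_ne_zero h0) one_lt_two)]
      have hpred : ((fun i => a / 2 ^ i % 2 == 1) ∘ Nat.succ) = (fun i => a / 2 / 2 ^ i % 2 == 1) := by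
        funext i
        simp [Function.comp, Nat.div_div_eq_div_mul, pow_succ, Nat.mul_comm]
      rw [hpred]
      by_cases h1 : a % 2 = 1 <;>
        simp [h1, pow_zero, Nat.div_one]

lemma zerosF_filter (a : Nat) :
    zerosF a = (List.range (PySem.Int.bitLength (a : Int))).filter
      (fun i => !(a / 2 ^ i % 2 == 1)) := by
  induction a using Nat.strong_induction_on with
  | _ a ih =>
    by_cases h0 : a = 0
    · subst h0; simp [zerosF, PySem.Int.bitLength_zero]
    · rw [zerosF]; simp only [h0, dite_false]
      rw [PySem.Int.bitLength_natCast (Nat.pos_of_ne_zero h0), List.range_succ_eq_map,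
        List.filter_cons, List.filter_map,
        ih (a / 2) (Nat.div_lt_self (Nat.pos_of_ne_zero h0) one_lt_two)]
      have hpred : ((fun i => !(a / 2 ^ i % 2 == 1)) ∘ Nat.succ) = (fun i => !(a / 2 / 2 ^ i % 2 == 1)) := by
        funext i
        simp [Function.comp, Nat.div_div_eq_div_mul, pow_succ, Nat.mul_comm]
      rw [hpred]
      by_cases h1 : a % 2 = 1 <;> simp [h1, pow_zero, Nat.div_one]

lemma sumP_cons (q : Nat) (l : List Nat) : sumP (q :: l) = 2 ^ q + sumP l := by simp [sumP]

lemma sumP_nil : sumP [] = 0 := rfl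

lemma sumP_single : sumP [0] = 1 := rfl

lemma sumP_map_add_one (l : List Nat) : sumP (l.map (· + 1)) = 2 * sumP l := by
  simp only [sumP, List.map_map]
  have : ((fun x => 2 ^ x) ∘ (· + 1)) = (fun x : Nat => 2 * 2 ^ x) := by
    funext x; simp [Function.comp, pow_succ, Nat.mul_comm]
  rw [this, ← List.sum_map_mul_left]

lemma sumP_append (l1 l2 : List Nat) : sumP (l1 ++ l2) = sumP l1 + sumP l2 := by
  simp [sumP]

lemma sumP_onesF (a : Nat) : sumP (onesF a) = a := by
  induction a using Nat.strong_induction_on with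
  | _ a ih =>
    by_cases h0 : a = 0
    · subst h0; simp [onesF, sumP]
    · rw [onesF]; simp only [h0, dite_false]
      rw [sumP_append, sumP_map_add_one, ih (a / 2) (Nat.div_lt_self (Nat.pos_of_ne_zero h0) one_lt_two)]
      by_cases h1 : a % 2 = 1 <;> simp [h1, sumP] <;> omega

lemma sumP_onesF_add_zerosF (a : Nat) :
    sumP (onesF a) + sumP (zerosF a) = 2 ^ PySem.Int.bitLength (a : Int) - 1 := by
  induction a using Nat.strong_induction_on with
  | _ a ih =>
    by_cases h0 : a = 0
    · subst h0; simp [onesF, zerosF, sumP, PySem.Int.bitLength_zero]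
    · rw [onesF, zerosF]; simp only [h0, dite_false]
      rw [PySem.Int.bitLength_natCast (Nat.pos_of_ne_zero h0), sumP_append, sumP_append,
        sumP_map_add_one, sumP_map_add_one, pow_succ]
      have hrec := ih (a / 2) (Nat.div_lt_self (Nat.pos_of_ne_zero h0) one_lt_two)
      have hpos : 1 ≤ 2 ^ PySem.Int.bitLength ((a / 2 : Nat) : Int) := Nat.one_le_two_pow
      generalize hL : PySem.Int.bitLength ((a / 2 : Nat) : Int) = L
      rw [hL] at hrec hpos
      by_cases h1 : a % 2 = 1 <;>
        simp only [h1, if_true, if_false, sumP_nil, sumP_single] <;> omega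

lemma len_onesF_add_zerosF (a : Nat) :
    (onesF a).length + (zerosF a).length = PySem.Int.bitLength (a : Int) := by
  induction a using Nat.strong_induction_on with
  | _ a ih =>
    by_cases h0 : a = 0
    · subst h0; simp [onesF, zerosF, PySem.Int.bitLength_zero]
    · rw [onesF, zerosF]; simp only [h0, dite_false]
      rw [PySem.Int.bitLength_natCast (Nat.pos_of_ne_zero h0)]
      have hrec := ih (a / 2) (Nat.div_lt_self (Nat.pos_of_ne_zero h0) one_lt_two)
      generalize hL : PySem.Int.bitLength ((a / 2 : Nat) : Int) = L
      rw [hL] at hrec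
      by_cases h1 : a % 2 = 1 <;> simp only [h1, if_true, if_false, List.length_append, List.length_map, List.length_nil, List.length_cons] <;> omega

lemma solveBits_eq (a : Nat) : ∀ (pos : Nat) (p1 p0 : List Nat),
    solveBits a pos p1 p0 =
      (p1 ++ (onesF a).map (· + pos), p0 ++ (zerosF a).map (· + pos)) := by
  induction a using Nat.strong_induction_on with
  | _ a ih =>
    intro pos p1 p0
    rw [solveBits]
    by_cases h0 : a = 0
    · simp [h0, onesF, zerosF]
    · rw [onesF, zerosF]; simp only [h0, dite_false, ne_eq, not_false_iff, dif_pos]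
      have hd := Nat.div_lt_self (Nat.pos_of_ne_zero h0) one_lt_two
      by_cases h1 : a % 2 = 1 <;>
        simp [h1, ih (a / 2) hd, List.append_assoc] <;>
        exact ⟨fun _ _ => Nat.add_comm _ _, fun _ _ => Nat.add_comm _ _⟩

lemma testBit_false_of_dvd {X q : Nat} (h : 2 ^ (q + 1) ∣ X) : X.testBit q = false := by
  obtain ⟨m, rfl⟩ := h
  rw [Nat.testBit_eq_decide_div_mod_eq]
  have h2 : 2 ^ (q + 1) * m / 2 ^ q = 2 * m := by
    have : 2 ^ (q + 1) * m = 2 ^ q * (2 * m) := by ring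
    rw [this, Nat.mul_div_cancel_left _ (pow_pos two_pos q)]
  rw [h2]; simp [Nat.mul_mod_right]

lemma lor_two_pow_of_testBit_false {X q : Nat} (h : X.testBit q = false) :
    X ||| 2 ^ q = X + 2 ^ q := by
  have hq1 : 0 < 2 ^ (q + 1) := pow_pos two_pos _
  have hdecomp : X = 2 ^ (q + 1) * (X / 2 ^ (q + 1)) + X % 2 ^ (q + 1) :=
    (Nat.div_add_mod X (2 ^ (q + 1))).symm
  set hi := X / 2 ^ (q + 1) with hhi
  set lo := X % 2 ^ (q + 1) with hlo
  have hlolt : lo < 2 ^ (q + 1) := Nat.mod_lt _ hq1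
  have hlobit : lo.testBit q = false := by
    rw [hlo, Nat.testBit_mod_two_pow]; simp [h]
  have hloq : lo < 2 ^ q := by
    by_contra hc
    rw [not_lt] at hc
    have h1 : lo / 2 ^ q < 2 := by
      rw [Nat.div_lt_iff_lt_mul (pow_pos two_pos q)]
      have : (2:Nat) ^ (q + 1) = 2 ^ q * 2 := by ring
      omega
    have h2 : 1 ≤ lo / 2 ^ q := (Nat.le_div_iff_mul_le (pow_pos two_pos q)).mpr (by omega)
    have h3 : lo / 2 ^ q = 1 := by omega
    rw [Nat.testBit_eq_decide_div_mod_eq, h3] at hlobit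
    simp at hlobit
  have hsum : lo + 2 ^ q < 2 ^ (q + 1) := by
    have : (2:Nat) ^ (q + 1) = 2 ^ q + 2 ^ q := by ring
    omega
  apply Nat.eq_of_testBit_eq
  intro j
  rw [Nat.testBit_lor, Nat.testBit_two_pow]
  conv_lhs => rw [hdecomp]
  have hrhs : X + 2 ^ q = 2 ^ (q + 1) * hi + (lo + 2 ^ q) := by omega
  rw [hrhs, Nat.testBit_two_pow_mul_add _ hlolt, Nat.testBit_two_pow_mul_add _ hsum]
  have hlop : lo + 2 ^ q = 2 ^ q * 1 + lo := by omega
  rcases lt_trichotomy j q with hj | hj | hj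
  · have : (lo + 2 ^ q).testBit j = lo.testBit j := by
      rw [hlop, Nat.testBit_two_pow_mul_add 1 hloq]; simp [hj]
    simp [this, show j < q + 1 by omega, show q ≠ j by omega]
  · subst hj
    have : (lo + 2 ^ j).testBit j = true := by
      rw [hlop, Nat.testBit_two_pow_mul_add 1 hloq]; simp
    simp [this, hlobit]
  · simp [show ¬ j < q + 1 by omega, show q ≠ j by omega]

lemma lor_two_pow_of_dvd {X q : Nat} (h : 2 ^ (q + 1) ∣ X) : X ||| 2 ^ q = X + 2 ^ q :=
  lor_two_pow_of_testBit_false (testBit_false_of_dvd h)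

lemma testBit_add_two_pow_of_ne {X q i : Nat} (h : X.testBit q = false) (hne : q ≠ i) :
    (X + 2 ^ q).testBit i = X.testBit i := by
  rw [← lor_two_pow_of_testBit_false h, Nat.testBit_lor, Nat.testBit_two_pow]
  simp [hne]

-- phase 1 of A's popping loop: pop the set-bit positions, highest first
lemma solvePop_ones (l : List Nat) : ∀ (B : Int) (S : List Nat) (p0 : List Nat),
    List.Pairwise (· < ·) (l ++ S) → 
    solvePop B (sumP S) l p0 =
      if B ≤ (l.length : Int) then sumP (l.drop (l.length - B.toNat) ++ S)
      else solvePop (B - l.length) (sumP (l ++ S)) [] p0 := by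
  induction l using List.reverseRecOn with
  | nil =>
    intro B S p0 _
    simp only [List.length_nil, Nat.cast_zero, List.nil_append, List.drop_nil, Int.sub_zero]
    by_cases hB : B ≤ 0
    · rw [if_pos hB, solvePop]
      simp [show ¬ (0:Int) < B by omega]
    · rw [if_neg (by omega)]
  | append_singleton l' q ih =>
    intro B S p0 hp
    by_cases hB : B ≤ 0
    · rw [solvePop]
      have h1 : ((l' ++ [q]).length : Int) = l'.length + 1 := by simp
      simp only [show ¬ (0:Int) < B by omega, dite_false]
      rw [if_pos (by omega), show (l' ++ [q]).length - B.toNat = (l' ++ [q]).length by omega,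
        List.drop_length, List.nil_append]
    · -- B ≥ 1 : pop q
      have hq : ∀ s ∈ S, q < s := by
        rw [List.pairwise_append] at hp
        exact fun s hs => hp.2.2 q (by simp) s hs
      have hdvd : 2 ^ (q + 1) ∣ sumP S := by
        apply List.dvd_sum
        intro x hx
        unfold sumP at hx
        rw [List.mem_map] at hx
        obtain ⟨s, hs, rfl⟩ := hx
        exact pow_dvd_pow 2 (hq s hs)
      rw [solvePop]
      rw [dif_pos (by omega : (0:Int) < B), dif_pos (by simp : l' ++ [q] ≠ [])]
      rw [List.getLast_concat, List.dropLast_concat, lor_two_pow_of_dvd hdvd]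
      have hS' : sumP S + 2 ^ q = sumP (q :: S) := by rw [sumP_cons]; omega
      rw [hS']
      have hp' : List.Pairwise (· < ·) (l' ++ q :: S) := by
        simpa [List.append_assoc] using hp
      rw [ih (B - 1) (q :: S) p0 hp']
      have hlen : ((l' ++ [q]).length : Int) = (l'.length : Int) + 1 := by simp
      by_cases hc : B - 1 ≤ (l'.length : Int)
      · rw [if_pos hc, if_pos (by simp; omega)]
        have hm : (l' ++ [q]).length - B.toNat ≤ l'.length := by simp; omega
        rw [List.drop_append_of_le_length (by simp at hm ⊢; omega)]
        have : l'.length - (B - 1).toNat = (l' ++ [q]).length - B.toNat := by simp; omega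
        rw [this]
        simp [List.append_assoc]
      · rw [if_neg hc, if_neg (by simp at hc ⊢; omega)]
        have h1 : B - 1 - (l'.length : Int) = B - ((l' ++ [q]).length : Int) := by simp; omega
        rw [h1]
        have h2 : l' ++ q :: S = (l' ++ [q]) ++ S := by simp
        rw [h2]

-- phase 2: pop the clear-bit positions (reversed list), lowest first
lemma solvePop_zeros (zs : List Nat) : ∀ (B : Int) (X : Nat),
    List.Pairwise (· < ·) zs → (∀ i ∈ zs, X.testBit i = false) →
    solvePop B X [] zs.reverse =
      if B ≤ (zs.length : Int) then X + sumP (zs.take B.toNat)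
      else solvePop (B - zs.length) (X + sumP zs) [] [] := by
  induction zs with
  | nil =>
    intro B X _ _
    simp only [List.length_nil, Nat.cast_zero, List.take_nil, List.reverse_nil, sumP_nil,
      Nat.add_zero, Int.sub_zero]
    by_cases hB : B ≤ 0
    · rw [if_pos hB, solvePop]
      simp [show ¬ (0:Int) < B by omega]
    · rw [if_neg (by omega)]
  | cons q rest ih =>
    intro B X hp hbit
    by_cases hB : B ≤ 0
    · rw [if_pos (by simp; omega), show B.toNat = 0 by omega, List.take_zero, sumP_nil, solvePop]
      simp [show ¬ (0:Int) < B by omega]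
    · have hq : X.testBit q = false := hbit q (by simp)
      rw [solvePop]
      rw [dif_pos (by omega : (0:Int) < B)]
      rw [dif_neg (by simp : ¬ (([] : List Nat) ≠ []))]
      have hrev : (q :: rest).reverse = rest.reverse ++ [q] := by simp
      rw [hrev]
      rw [dif_pos (by simp : rest.reverse ++ [q] ≠ [])]
      rw [List.getLast_concat, List.dropLast_concat, lor_two_pow_of_testBit_false hq]
      have hbit' : ∀ i ∈ rest, (X + 2 ^ q).testBit i = false := by
        intro i hi
        rw [testBit_add_two_pow_of_ne hq (by
          have := (List.pairwise_cons.mp hp).1 i hi; omega)]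
        exact hbit i (by simp [hi])
      rw [ih (B - 1) (X + 2 ^ q) (List.pairwise_cons.mp hp).2 hbit']
      by_cases hc : B - 1 ≤ (rest.length : Int)
      · rw [if_pos hc, if_pos (by simp; omega)]
        have hk : B.toNat = (B - 1).toNat + 1 := by omega
        rw [hk, List.take_succ_cons, sumP_cons]
        omega
      · rw [if_neg hc, if_neg (by simp at hc ⊢; omega)]
        rw [sumP_cons]
        have h1 : B - 1 - (rest.length : Int) = B - (((q :: rest).length : Nat) : Int) := by
          simp; omega
        rw [h1]
        have h2 : X + 2 ^ q + sumP rest = X + (2 ^ q + sumP rest) := by omega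
        rw [h2]

lemma solveNoBits_pow_sub_one (L : Nat) : ∀ acc : Nat, solveNoBits (2 ^ L - 1) acc = acc + L := by
  induction L with
  | zero => intro acc; rw [solveNoBits]; simp
  | succ L ih =>
    intro acc
    have h1 : 1 ≤ 2 ^ L := Nat.one_le_two_pow
    have hne : 2 ^ (L + 1) - 1 ≠ 0 := by
      have : (2:Nat) ^ (L + 1) = 2 ^ L + 2 ^ L := by ring
      omega
    rw [solveNoBits, if_pos hne]
    have hdiv : (2 ^ (L + 1) - 1) / 2 = 2 ^ L - 1 := by
      have h2 : 2 ^ (L + 1) - 1 = 2 * (2 ^ L - 1) + 1 := by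
        have : (2:Nat) ^ (L + 1) = 2 * 2 ^ L := by ring
        omega
      rw [h2, Nat.mul_add_div (by norm_num)]
      norm_num
    rw [hdiv, ih]
    omega

-- phase 3: both lists empty; each step sets the bit at X's bit length
lemma solvePop_pad (b : Nat) : ∀ (B : Int) (L : Nat), B.toNat = b →
    solvePop B (2 ^ L - 1) [] [] = 2 ^ (L + b) - 1 := by
  induction b with
  | zero =>
    intro B L hB
    rw [solvePop]; simp [show ¬ (0:Int) < B by omega]
  | succ b ih =>
    intro B L hB
    have h1 : 1 ≤ 2 ^ L := Nat.one_le_two_pow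
    rw [solvePop, dif_pos (by omega : (0:Int) < B)]
    rw [dif_neg (by simp : ¬ (([] : List Nat) ≠ [])), dif_neg (by simp : ¬ (([] : List Nat) ≠ []))]
    rw [solveNoBits_pow_sub_one L 0]
    have hbit : (2 ^ L - 1).testBit (0 + L) = false := by
      rw [Nat.testBit_two_pow_sub_one]; simp
    rw [lor_two_pow_of_testBit_false hbit]
    have h2 : 2 ^ L - 1 + 2 ^ (0 + L) = 2 ^ (L + 1) - 1 := by
      have : (2:Nat) ^ (L + 1) = 2 ^ L + 2 ^ L := by ring
      simp only [Nat.zero_add]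
      omega
    rw [h2, ih (B - 1) (L + 1) (by omega)]
    have : L + 1 + b = L + (b + 1) := by omega
    rw [this]

lemma natCast_beq (m k : Nat) : (((m : Nat) : Int) == ((k : Nat) : Int)) = (m == k) := by
  by_cases h : m = k <;> simp [h, Nat.cast_inj]

lemma alt_pred (a i : Nat) :
    (PySem.Int.band (((a : Nat) : Int) >>> i) 1 == 1) = (a / 2 ^ i % 2 == 1) := by
  rw [← Int.natCast_shiftRight, show (1 : Int) = ((1 : Nat) : Int) from rfl,
    PySem.Int.band_natCast, Nat.shiftRight_eq_div_pow, Nat.and_one_is_mod, natCast_beq]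

lemma foldl_sumP_int (l : List Nat) :
    l.foldl (fun (s : Int) (p : Nat) => s + 2 ^ p) 0 = ((sumP l : Nat) : Int) := by
  rw [PySem.List.foldl_add l (fun p => (2 : Int) ^ p) 0]
  rw [sumP, Nat.cast_list_sum, List.map_map]
  rw [List.map_congr_left (fun (x : Nat) _ => by simp [Function.comp] :
    ∀ x ∈ l, (Nat.cast ∘ fun p => 2 ^ p) x = (2 : Int) ^ x)]
  simp

-- ===== VERDICT (by name: the statement is the Claim_ definition above) =====
theorem solve_spec : Claim_equal_solve := by
  intro A B _ hpre
  obtain ⟨hA, hB⟩ := hpre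
  unfold Spec_solve
  obtain ⟨a, rfl⟩ : ∃ a : Nat, A = (a : Int) := ⟨A.toNat, (Int.toNat_of_nonneg hA).symm⟩
  -- abbreviations
  have hset : (List.range (PySem.Int.bitLength (a : Int))).filter
      (fun (i : Nat) => PySem.Int.band (((a : Nat) : Int) >>> i) 1 == 1) = onesF a := by
    rw [onesF_filter]; exact List.filter_congr (fun i _ => alt_pred a i)
  have hzet : (List.range (PySem.Int.bitLength (a : Int))).filter
      (fun (i : Nat) => decide ¬((PySem.Int.band (((a : Nat) : Int) >>> i) 1 == 1) = true)) = zerosF a := by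
    rw [zerosF_filter]
    exact List.filter_congr (fun i _ => by
      rw [alt_pred a i]
      by_cases h : a / 2 ^ i % 2 = 1
      · simp [h]
      · have h0 : a / 2 ^ i % 2 = 0 := by omega
        simp [h0])
  have hpair1 : List.Pairwise (· < ·) (onesF a) := by
    rw [onesF_filter]; exact List.Pairwise.sublist List.filter_sublist List.pairwise_lt_range
  have hpair0 : List.Pairwise (· < ·) (zerosF a) := by
    rw [zerosF_filter]; exact List.Pairwise.sublist List.filter_sublist List.pairwise_lt_range
  have hzbit : ∀ i ∈ zerosF a, a.testBit i = false := by
    intro i hi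
    rw [zerosF_filter, List.mem_filter] at hi
    rw [Nat.testBit_eq_decide_div_mod_eq]
    simpa using hi.2
  have hlen := len_onesF_add_zerosF a
  have hbound : a < 2 ^ PySem.Int.bitLength (a : Int) := by
    have := PySem.Int.lt_two_pow_bitLength (a : Int)
    simpa using this
  have hsumz := sumP_onesF_add_zerosF a
  rw [sumP_onesF a] at hsumz
  set bl := PySem.Int.bitLength (a : Int) with hbl
  set n := (onesF a).length with hn
  set z := (zerosF a).length with hz
  -- left-hand side: A's loops
  rw [solve, Int.toNat_natCast]
  rw [solveBits_eq a 0 [] []]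
  simp only [List.nil_append]
  have hmap0 : ∀ l : List Nat, l.map (· + 0) = l := by intro l; simp
  rw [hmap0, hmap0]
  rw [show (0 : Nat) = sumP [] from rfl]
  rw [solvePop_ones (onesF a) B [] ((zerosF a).reverse) (by simpa using hpair1)]
  -- right-hand side: B's case split
  simp only [solve_alt, hset, hzet, ← hbl, ← hn, Nat.cast_zero]
  by_cases hc1 : B ≤ (n : Int)
  · rw [if_pos hc1, if_pos hc1]
    rw [List.append_nil, foldl_sumP_int, show ((n : Int) - B).toNat = n - B.toNat by omega]
  · rw [if_neg hc1, if_neg hc1]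
    have hBn : (n : Int) < B := by omega
    rw [List.append_nil, sumP_onesF a]
    rw [solvePop_zeros (zerosF a) (B - n) a hpair0 hzbit]
    by_cases hc3 : B - (n : Int) ≤ (z : Int)
    · rw [if_pos hc3]
      by_cases hc4 : B ≥ (bl : Int)
      · -- B = bl exactly: all zero positions consumed
        have hBbl : B = (bl : Int) := by omega
        rw [if_pos hc4]
        have ht : (B - (n : Int)).toNat = z := by omega
        rw [ht, List.take_length]
        rw [Int.shiftLeft_eq, one_mul]
        have hBt : B.toNat = bl := by omega
        rw [hBt]
        have h1 : 1 ≤ (2 : Nat) ^ bl := Nat.one_le_two_pow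
        have : a + sumP (zerosF a) = 2 ^ bl - 1 := by omega
        rw [this]
        push_cast [h1]
        ring
      · rw [if_neg hc4]
        rw [foldl_sumP_int, show (B - (n : Int)).toNat = B.toNat - n by omega]
        push_cast
        ring
    · rw [if_neg hc3]
      have hc4 : B ≥ (bl : Int) := by omega
      rw [if_pos hc4]
      have h1 : 1 ≤ (2 : Nat) ^ bl := Nat.one_le_two_pow
      have : a + sumP (zerosF a) = 2 ^ bl - 1 := by omega
      rw [this]
      rw [solvePop_pad (B - (n : Int) - (z : Int)).toNat (B - n - z) bl rfl]
      rw [Int.shiftLeft_eq, one_mul]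
      have hexp : bl + (B - (n : Int) - (z : Int)).toNat = B.toNat := by omega
      rw [hexp]
      have h2 : 1 ≤ (2 : Nat) ^ B.toNat := Nat.one_le_two_pow
      push_cast [h2]
      ring
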